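-- pv_equiv track=rewrite | github.com/liamcobbavanade/forms | notebook_email.py | print_company_responses
-- ===== SOURCE A (Python) =====
-- def print_company_responses(content_array):
--     content_array = [item.strip() for item in content_array]
--
--     response_text = ""
--     response_text += f"Hello {content_array[0]},\n\n"
--     response_text += "Thank you for filling out our quick quote service form. Here are some resources to help you understand the solutions you may need.\n\n"
--
--     if content_array[2] == "Security":
--         response_text += ("Q3: Microsoft Defender for Cloud helps you prevent, detect, and respond to threats with increased visibility into and control over the security of your Azure resources. Microsoft Sentinel delivers intelligent security analytics and threat intelligence. Azure Advisor is a personalized cloud consultant that helps you to optimize your Azure deployments. Learn more here: https://learn.microsoft.com/en-us/azure/security/fundamentals/overview#overview\n\n")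
--     elif content_array[2] == "Data migration":
--         response_text += ("Q3: Azure Database Migration Service is a fully managed service designed to enable seamless migrations from multiple database sources to Azure data platforms with minimal downtime. The Azure SQL Migration extension for Azure Data Studio brings together a simplified assessment, recommendation, and migration experience. Learn more here: https://learn.microsoft.com/en-us/azure/dms/dms-overview\n\n")
--     elif content_array[2] == "Storage":
--         response_text += ("Q3: Azure provides secure and scalable storage solutions. There are many different storage types to choose from, each with different benefits. Learn more here: https://learn.microsoft.com/en-us/azure/storage/common/storage-introduction\n\n")
--     elif content_array[2] == "Workplace modernisation":
--         response_text += ("Q3: Microsoft 365 provides a wide array of applications to streamline your business. Applications such as Word, PowerPoint, and Excel can be used for processing documents and doing presentations. Teams and Outlook help provide messaging systems within your organization. Learn more here: https://support.microsoft.com/en-us/office/microsoft-365-basics-video-training-396b8d9e-e118-42d0-8a0d-87d1f2f055fb\n\n")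
--     elif content_array[2] == "App development":
--         response_text += ("Q3: Avanade is experienced in making web applications and can develop one for you. To learn about the services we use to complete this visit: https://azure.microsoft.com/en-us/resources/developers\n\n")
--     else:
--         response_text += (f"Q3: Unknown response: {content_array[3]}\n\n")
--
--     if content_array[3] == "agree":
--         response_text += ("Q4: Azure Database Migration Service is a fully managed service designed to enable seamless migrations from multiple database sources to Azure data platforms with minimal downtime. The Azure SQL Migration extension for Azure Data Studio brings together a simplified assessment, recommendation, and migration experience. Learn more here: https://azure.microsoft.com/en-us/products/database-migration/.\n\n")
--
--     if content_array[4] == "agree":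
--         response_text += ("Q5: A move to Cloud may benefit your business, remove costly hardware and replace with an easily manageable Cloud infrastructure. You can use virtual machines and virtual storage to deploy and save your data without the need for physical machines. https://azure.microsoft.com/en-gb/products/azure-migrate/.\n\n")
--
--     if content_array[5] == "agree":
--         response_text += ("Q6: Microsoft Defender for Cloud helps you prevent, detect, and respond to threats with increased visibility into and control over the security of your Azure resources. Microsoft Sentinel delivers intelligent security analytics and threat intelligence. Azure Advisor is a personalized cloud consultant that helps you to optimize your Azure deployments. Learn more here: https://learn.microsoft.com/en-us/azure/security/fundamentals/overview#overview%22.\n\n")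
--
--     if content_array[6] == "agree":
--         response_text += ("Q7: Azure SQL Database is a managed cloud service by Microsoft Azure, ideal for modern applications. It features automatic scaling, AI assistance, mirroring, and robust security. Developers can leverage the latest SQL Server features without the overhead of managing infrastructure. https://azure.microsoft.com/en-us/products/azure-sql/database/.\n\n")
--
--     if content_array[7] == "agree":
--         response_text += ("Q8: Integrating Microsoft Copilot within businesses enhances productivity and creativity. Key steps include activating Copilot for Microsoft 365, exploring its features, and ensuring priority access to the latest models. With careful planning, Copilot transforms work processes, freeing up time for growth and innovation. Learn more here: https://support.microsoft.com/en-gb/office/frequently-asked-questions-about-copilot-for-microsoft-365-500fc65e-9973-4e42-9cf4-bdefb0eb04ce.\n\n")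
--
--     if content_array[8] == "agree":
--         response_text += ("Q9: Avanade, a leading provider of digital, cloud, and advisory services, specializes in application development. They create custom applications that deliver engaging experiences, combining beautiful design with effective back-end integration. Avanade also offers managed services for maintaining existing applications and provides strategic advice in areas like sales, marketing, finance, and operations. https://www.avanade.com/en/solutions/cloud-and-application-services/development.\n\n")
--
--     if content_array[9] == "agree":
--         response_text += ("Q10: Microsoft 365 is a cloud-powered productivity platform that includes apps like Word, Excel, PowerPoint, and Outlook. It’s available via subscription and offers cross-device installation, collaboration features, and cloud storage. Unlike Office 2021, it ensures up-to-date tools. Explore more at Microsoft 365. https://www.avanade.com/en/technologies/office-365.\n\n")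
--
--     if content_array[10] == "agree":
--         response_text += ("Q11: Speaking with a consultant will greatly benefit your company. Below is a link to Avanade’s website, navigate to “Contact us” and there you can fill out an inquiry form to send forward to a consultant. Link: https://www.avanade.com/en\n\n")
--
--
--     response_text += "\nThank you for filling out your inquiry, we hope to hear from you again soon.\n\n"
--     response_text += "Kind regards,\n"
--     response_text += "The Avanade team\n"
--
--     return response_text
-- ===== SOURCE B (Python) =====
-- INTRO = "Thank you for filling out our quick quote service form. Here are some resources to help you understand the solutions you may need.\n\n"
-- FOOTER = "\nThank you for filling out your inquiry, we hope to hear from you again soon.\n\nKind regards,\nThe Avanade team\n"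
--
-- Q3_CATEGORIES = ["Security", "Data migration", "Storage", "Workplace modernisation", "App development"]
-- Q3_TEXTS = [
--     "Q3: Microsoft Defender for Cloud helps you prevent, detect, and respond to threats with increased visibility into and control over the security of your Azure resources. Microsoft Sentinel delivers intelligent security analytics and threat intelligence. Azure Advisor is a personalized cloud consultant that helps you to optimize your Azure deployments. Learn more here: https://learn.microsoft.com/en-us/azure/security/fundamentals/overview#overview\n\n",
--     "Q3: Azure Database Migration Service is a fully managed service designed to enable seamless migrations from multiple database sources to Azure data platforms with minimal downtime. The Azure SQL Migration extension for Azure Data Studio brings together a simplified assessment, recommendation, and migration experience. Learn more here: https://learn.microsoft.com/en-us/azure/dms/dms-overview\n\n",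
--     "Q3: Azure provides secure and scalable storage solutions. There are many different storage types to choose from, each with different benefits. Learn more here: https://learn.microsoft.com/en-us/azure/storage/common/storage-introduction\n\n",
--     "Q3: Microsoft 365 provides a wide array of applications to streamline your business. Applications such as Word, PowerPoint, and Excel can be used for processing documents and doing presentations. Teams and Outlook help provide messaging systems within your organization. Learn more here: https://support.microsoft.com/en-us/office/microsoft-365-basics-video-training-396b8d9e-e118-42d0-8a0d-87d1f2f055fb\n\n",
--     "Q3: Avanade is experienced in making web applications and can develop one for you. To learn about the services we use to complete this visit: https://azure.microsoft.com/en-us/resources/developers\n\n",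
-- ]
--
-- MESSAGES = [
--     "Q4: Azure Database Migration Service is a fully managed service designed to enable seamless migrations from multiple database sources to Azure data platforms with minimal downtime. The Azure SQL Migration extension for Azure Data Studio brings together a simplified assessment, recommendation, and migration experience. Learn more here: https://azure.microsoft.com/en-us/products/database-migration/.\n\n",
--     "Q5: A move to Cloud may benefit your business, remove costly hardware and replace with an easily manageable Cloud infrastructure. You can use virtual machines and virtual storage to deploy and save your data without the need for physical machines. https://azure.microsoft.com/en-gb/products/azure-migrate/.\n\n",
--     "Q6: Microsoft Defender for Cloud helps you prevent, detect, and respond to threats with increased visibility into and control over the security of your Azure resources. Microsoft Sentinel delivers intelligent security analytics and threat intelligence. Azure Advisor is a personalized cloud consultant that helps you to optimize your Azure deployments. Learn more here: https://learn.microsoft.com/en-us/azure/security/fundamentals/overview#overview%22.\n\n",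
--     "Q7: Azure SQL Database is a managed cloud service by Microsoft Azure, ideal for modern applications. It features automatic scaling, AI assistance, mirroring, and robust security. Developers can leverage the latest SQL Server features without the overhead of managing infrastructure. https://azure.microsoft.com/en-us/products/azure-sql/database/.\n\n",
--     "Q8: Integrating Microsoft Copilot within businesses enhances productivity and creativity. Key steps include activating Copilot for Microsoft 365, exploring its features, and ensuring priority access to the latest models. With careful planning, Copilot transforms work processes, freeing up time for growth and innovation. Learn more here: https://support.microsoft.com/en-gb/office/frequently-asked-questions-about-copilot-for-microsoft-365-500fc65e-9973-4e42-9cf4-bdefb0eb04ce.\n\n",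
--     "Q9: Avanade, a leading provider of digital, cloud, and advisory services, specializes in application development. They create custom applications that deliver engaging experiences, combining beautiful design with effective back-end integration. Avanade also offers managed services for maintaining existing applications and provides strategic advice in areas like sales, marketing, finance, and operations. https://www.avanade.com/en/solutions/cloud-and-application-services/development.\n\n",
--     "Q10: Microsoft 365 is a cloud-powered productivity platform that includes apps like Word, Excel, PowerPoint, and Outlook. It\u2019s available via subscription and offers cross-device installation, collaboration features, and cloud storage. Unlike Office 2021, it ensures up-to-date tools. Explore more at Microsoft 365. https://www.avanade.com/en/technologies/office-365.\n\n",
--     "Q11: Speaking with a consultant will greatly benefit your company. Below is a link to Avanade\u2019s website, navigate to \u201cContact us\u201d and there you can fill out an inquiry form to send forward to a consultant. Link: https://www.avanade.com/en\n\n",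
-- ]
--
-- def _rest(answers, messages):
--     # Builds Q4..Q11 plus the footer back-to-front by recursion: one answer is
--     # consumed per message; no index arithmetic.
--     if not messages:
--         return FOOTER
--     head = messages[0] if answers[0] == "agree" else ""
--     return head + _rest(answers[1:], messages[1:])
--
-- def print_company_responses(content_array):
--     items = [s.strip() for s in content_array]
--     try:
--         q3 = Q3_TEXTS[Q3_CATEGORIES.index(items[2])]
--     except ValueError:
--         q3 = f"Q3: Unknown response: {items[3]}\n\n"
--     return f"Hello {items[0]},\n\n" + INTRO + q3 + _rest(items[3:], MESSAGES)
-- ===== Notes on version B (the rewrite author's own statement) =====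
-- stated objective: alternative
-- what changed: Instead of A's straight-line indexed if blocks appended left-to-right into an accumulator, B picks the Q3 text by a linear list.index search with a ValueError fallback, and builds Q4-Q11 plus the footer back-to-front by a recursion that consumes the answers suffix items[3:] in lockstep with the message list (no index arithmetic, no accumulator).
import Mathlib
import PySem

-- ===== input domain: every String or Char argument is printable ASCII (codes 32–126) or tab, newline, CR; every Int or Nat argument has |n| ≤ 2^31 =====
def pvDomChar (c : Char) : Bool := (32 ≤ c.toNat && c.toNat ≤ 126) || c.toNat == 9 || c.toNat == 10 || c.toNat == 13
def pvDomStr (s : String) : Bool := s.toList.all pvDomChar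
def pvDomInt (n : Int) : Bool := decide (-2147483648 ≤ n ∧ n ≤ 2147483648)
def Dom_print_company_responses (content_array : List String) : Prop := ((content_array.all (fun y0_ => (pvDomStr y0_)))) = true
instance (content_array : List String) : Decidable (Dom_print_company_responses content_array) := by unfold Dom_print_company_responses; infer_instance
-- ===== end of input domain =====

-- B builds the text differently: the Q3 text is selected by a linear list search (list.index with a
-- fallback) and the Q4–Q11 blocks plus the footer are produced back-to-front by a recursion that
-- consumes the answers suffix in lockstep with the message list. Equivalence is on the return value.

-- Shared string constants (byte-for-byte the messages of the Python source).
def pvSec : String := "Q3: Microsoft Defender for Cloud helps you prevent, detect, and respond to threats with increased visibility into and control over the security of your Azure resources. Microsoft Sentinel delivers intelligent security analytics and threat intelligence. Azure Advisor is a personalized cloud consultant that helps you to optimize your Azure deployments. Learn more here: https://learn.microsoft.com/en-us/azure/security/fundamentals/overview#overview\n\n"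
def pvDataMig : String := "Q3: Azure Database Migration Service is a fully managed service designed to enable seamless migrations from multiple database sources to Azure data platforms with minimal downtime. The Azure SQL Migration extension for Azure Data Studio brings together a simplified assessment, recommendation, and migration experience. Learn more here: https://learn.microsoft.com/en-us/azure/dms/dms-overview\n\n"
def pvStorage : String := "Q3: Azure provides secure and scalable storage solutions. There are many different storage types to choose from, each with different benefits. Learn more here: https://learn.microsoft.com/en-us/azure/storage/common/storage-introduction\n\n"
def pvWorkplace : String := "Q3: Microsoft 365 provides a wide array of applications to streamline your business. Applications such as Word, PowerPoint, and Excel can be used for processing documents and doing presentations. Teams and Outlook help provide messaging systems within your organization. Learn more here: https://support.microsoft.com/en-us/office/microsoft-365-basics-video-training-396b8d9e-e118-42d0-8a0d-87d1f2f055fb\n\n"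
def pvAppDev : String := "Q3: Avanade is experienced in making web applications and can develop one for you. To learn about the services we use to complete this visit: https://azure.microsoft.com/en-us/resources/developers\n\n"
def pvQ4 : String := "Q4: Azure Database Migration Service is a fully managed service designed to enable seamless migrations from multiple database sources to Azure data platforms with minimal downtime. The Azure SQL Migration extension for Azure Data Studio brings together a simplified assessment, recommendation, and migration experience. Learn more here: https://azure.microsoft.com/en-us/products/database-migration/.\n\n"
def pvQ5 : String := "Q5: A move to Cloud may benefit your business, remove costly hardware and replace with an easily manageable Cloud infrastructure. You can use virtual machines and virtual storage to deploy and save your data without the need for physical machines. https://azure.microsoft.com/en-gb/products/azure-migrate/.\n\n"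
def pvQ6 : String := "Q6: Microsoft Defender for Cloud helps you prevent, detect, and respond to threats with increased visibility into and control over the security of your Azure resources. Microsoft Sentinel delivers intelligent security analytics and threat intelligence. Azure Advisor is a personalized cloud consultant that helps you to optimize your Azure deployments. Learn more here: https://learn.microsoft.com/en-us/azure/security/fundamentals/overview#overview%22.\n\n"
def pvQ7 : String := "Q7: Azure SQL Database is a managed cloud service by Microsoft Azure, ideal for modern applications. It features automatic scaling, AI assistance, mirroring, and robust security. Developers can leverage the latest SQL Server features without the overhead of managing infrastructure. https://azure.microsoft.com/en-us/products/azure-sql/database/.\n\n"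
def pvQ8 : String := "Q8: Integrating Microsoft Copilot within businesses enhances productivity and creativity. Key steps include activating Copilot for Microsoft 365, exploring its features, and ensuring priority access to the latest models. With careful planning, Copilot transforms work processes, freeing up time for growth and innovation. Learn more here: https://support.microsoft.com/en-gb/office/frequently-asked-questions-about-copilot-for-microsoft-365-500fc65e-9973-4e42-9cf4-bdefb0eb04ce.\n\n"
def pvQ9 : String := "Q9: Avanade, a leading provider of digital, cloud, and advisory services, specializes in application development. They create custom applications that deliver engaging experiences, combining beautiful design with effective back-end integration. Avanade also offers managed services for maintaining existing applications and provides strategic advice in areas like sales, marketing, finance, and operations. https://www.avanade.com/en/solutions/cloud-and-application-services/development.\n\n"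
def pvQ10 : String := "Q10: Microsoft 365 is a cloud-powered productivity platform that includes apps like Word, Excel, PowerPoint, and Outlook. It’s available via subscription and offers cross-device installation, collaboration features, and cloud storage. Unlike Office 2021, it ensures up-to-date tools. Explore more at Microsoft 365. https://www.avanade.com/en/technologies/office-365.\n\n"
def pvQ11 : String := "Q11: Speaking with a consultant will greatly benefit your company. Below is a link to Avanade’s website, navigate to “Contact us” and there you can fill out an inquiry form to send forward to a consultant. Link: https://www.avanade.com/en\n\n"
def pvIntro : String := "Thank you for filling out our quick quote service form. Here are some resources to help you understand the solutions you may need.\n\n"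
def pvFooter : String := "\nThank you for filling out your inquiry, we hope to hear from you again soon.\n\nKind regards,\nThe Avanade team\n"

-- ===== PORT A =====
-- Indexing: all Python indices here are literal non-negative ints; under Pre_ (length ≥ 11)
-- `List.getD i ""` is exactly Python's `content_array[i]` (no negative/out-of-range case arises).
def print_company_responses (content_array : List String) : String :=
  let ca := content_array.map PySem.Str.strip
  let rt := ""
  let rt := rt ++ ("Hello " ++ ca.getD 0 "" ++ ",\n\n")
  let rt := rt ++ pvIntro
  let rt := rt ++
    (if ca.getD 2 "" = "Security" then pvSec
     else if ca.getD 2 "" = "Data migration" then pvDataMig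
     else if ca.getD 2 "" = "Storage" then pvStorage
     else if ca.getD 2 "" = "Workplace modernisation" then pvWorkplace
     else if ca.getD 2 "" = "App development" then pvAppDev
     else ("Q3: Unknown response: " ++ ca.getD 3 "" ++ "\n\n"))
  let rt := if ca.getD 3 "" = "agree" then rt ++ pvQ4 else rt
  let rt := if ca.getD 4 "" = "agree" then rt ++ pvQ5 else rt
  let rt := if ca.getD 5 "" = "agree" then rt ++ pvQ6 else rt
  let rt := if ca.getD 6 "" = "agree" then rt ++ pvQ7 else rt
  let rt := if ca.getD 7 "" = "agree" then rt ++ pvQ8 else rt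
  let rt := if ca.getD 8 "" = "agree" then rt ++ pvQ9 else rt
  let rt := if ca.getD 9 "" = "agree" then rt ++ pvQ10 else rt
  let rt := if ca.getD 10 "" = "agree" then rt ++ pvQ11 else rt
  rt ++ pvFooter

-- ===== PORT B =====
def pvQ3Categories : List String :=
  ["Security", "Data migration", "Storage", "Workplace modernisation", "App development"]
def pvQ3Texts : List String := [pvSec, pvDataMig, pvStorage, pvWorkplace, pvAppDev]
def pvMessages : List String := [pvQ4, pvQ5, pvQ6, pvQ7, pvQ8, pvQ9, pvQ10, pvQ11]

-- `_rest` of Source B: structural recursion on the message list, consuming one answer per step.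
-- (`answers[0]` is total here via getD ""; under Pre_ the answers list is never exhausted early.)
def pvRest (answers : List String) (messages : List String) : String :=
  match messages with
  | [] => pvFooter
  | m :: ms => (if answers.getD 0 "" = "agree" then m else "") ++ pvRest (answers.drop 1) ms

def print_company_responses_alt (content_array : List String) : String :=
  let items := content_array.map PySem.Str.strip
  let q3 :=
    match PySem.List.index? pvQ3Categories (items.getD 2 "") with
    | some i => pvQ3Texts.getD i ""
    | none => "Q3: Unknown response: " ++ items.getD 3 "" ++ "\n\n"
  "Hello " ++ items.getD 0 "" ++ ",\n\n" ++ pvIntro ++ q3 ++ pvRest (items.drop 3) pvMessages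

-- ===== PRECONDITION & SPEC =====
-- Pre_ excludes exactly the inputs on which the Python A raises IndexError (fewer than 11 items).
def Pre_print_company_responses (content_array : List String) : Prop := 11 ≤ content_array.length
instance (content_array : List String) : Decidable (Pre_print_company_responses content_array) := by
  unfold Pre_print_company_responses; infer_instance
def pvWitness_print_company_responses : List String :=
  ["Bob", "b", "Security", "agree", "no", "no", "agree", "no", "no", "no", "agree"]

def Spec_print_company_responses (content_array : List String) (out : String) : Prop := out = print_company_responses_alt content_array
instance (content_array : List String) (out : String) : Decidable (Spec_print_company_responses content_array out) := by unfold Spec_print_company_responses; infer_instance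

-- ===== CLAIM (what is proved, stated in full; the proofs are below) =====
def Claim_equal_print_company_responses : Prop := ∀ (content_array : List String), Dom_print_company_responses content_array → Pre_print_company_responses content_array → Spec_print_company_responses content_array (print_company_responses content_array)

-- ===== LEMMAS AND PROOFS =====
-- A's elif chain equals B's linear index search over the category list.
theorem pv_q3_eq (s2 s3 : String) :
    (if s2 = "Security" then pvSec
     else if s2 = "Data migration" then pvDataMig
     else if s2 = "Storage" then pvStorage
     else if s2 = "Workplace modernisation" then pvWorkplace
     else if s2 = "App development" then pvAppDev
     else ("Q3: Unknown response: " ++ s3 ++ "\n\n"))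
    = (match PySem.List.index? pvQ3Categories s2 with
       | some i => pvQ3Texts.getD i ""
       | none => "Q3: Unknown response: " ++ s3 ++ "\n\n") := by
  unfold pvQ3Categories
  split_ifs with h1 h2 h3 h4 h5
  · subst h1; rfl
  · subst h2; rfl
  · subst h3; rfl
  · subst h4; rfl
  · subst h5; rfl
  · have : PySem.List.index? ["Security", "Data migration", "Storage", "Workplace modernisation",
        "App development"] s2 = none := by
      rw [PySem.List.index?_eq_none_iff]
      simp only [List.mem_cons, List.not_mem_nil, or_false]
      push Not
      exact ⟨h1, h2, h3, h4, h5⟩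
    rw [this]

-- The sequential `if c then rt ++ m else rt` update pushes the accumulator out.
theorem pv_app_if (c : Prop) [Decidable c] (rt m : String) :
    (if c then rt ++ m else rt) = rt ++ (if c then m else "") := by
  split <;> simp

-- ===== VERDICT (by name: the statement is the Claim_ definition above) =====
theorem print_company_responses_spec : Claim_equal_print_company_responses := by
  intro ca _ hpre
  unfold Pre_print_company_responses at hpre
  unfold Spec_print_company_responses
  obtain ⟨a0, a1, a2, a3, a4, a5, a6, a7, a8, a9, a10, rest, rfl⟩ :
      ∃ a0 a1 a2 a3 a4 a5 a6 a7 a8 a9 a10 rest,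
        ca = a0 :: a1 :: a2 :: a3 :: a4 :: a5 :: a6 :: a7 :: a8 :: a9 :: a10 :: rest := by
    match ca, hpre with
    | a0 :: a1 :: a2 :: a3 :: a4 :: a5 :: a6 :: a7 :: a8 :: a9 :: a10 :: rest, _ =>
      exact ⟨a0, a1, a2, a3, a4, a5, a6, a7, a8, a9, a10, rest, rfl⟩
  simp only [print_company_responses, print_company_responses_alt, List.map_cons]
  rw [← pv_q3_eq]
  simp only [pvRest, pvMessages, List.getD, List.drop, pv_app_if]
  simp [String.append_assoc]
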